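-- pv_equiv track=rewrite | github.com/benquick123/code-profiling | code/izpiti/izpit01a/M-17132-1304.py | roboti
-- ===== SOURCE A (Python) =====
-- def roboti(navodila, n):
--     roboti = []
--     for i in range(n):
--         roboti.append(Robot())
--     for robo_nr in range(n):
--         for c in navodila[robo_nr::n]:
--             if c == "S":
--                 if roboti[robo_nr].smer == 1:
--                     roboti[robo_nr].levo()
--                 if roboti[robo_nr].smer == 2:
--                     roboti[robo_nr].desno()
--                     roboti[robo_nr].desno()
--                 if roboti[robo_nr].smer == 3:
--                     roboti[robo_nr].desno()
--             elif c == "J":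
--                 if roboti[robo_nr].smer == 1:
--                     roboti[robo_nr].desno()
--                 if roboti[robo_nr].smer == 4:
--                     roboti[robo_nr].desno()
--                     roboti[robo_nr].desno()
--                 if roboti[robo_nr].smer == 3:
--                     roboti[robo_nr].levo()
--             elif c == "V":
--                 if roboti[robo_nr].smer == 4:
--                     roboti[robo_nr].desno()
--                 if roboti[robo_nr].smer == 2:
--                     roboti[robo_nr].levo()
--                 if roboti[robo_nr].smer == 3:
--                     roboti[robo_nr].levo()
--                     roboti[robo_nr].levo()
--             elif c == "Z":
--                 if roboti[robo_nr].smer == 2: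
--                     roboti[robo_nr].desno()
--                 if roboti[robo_nr].smer == 1:
--                     roboti[robo_nr].levo()
--                     roboti[robo_nr].levo()
--                 if roboti[robo_nr].smer == 4:
--                     roboti[robo_nr].levo()
--             roboti[robo_nr].naprej(1)
--             roboti[robo_nr].smer = 1
--     rezultat = []
--     for robot in roboti:
--         rezultat.append(robot.koordinate())
--     return rezultat
--
-- class Robot:
--     def __init__(self):
--         self.x = self.y = 0
--         self.smer = 1
--
--     def desno(self):
--         self.smer = (self.smer + 1) % 4
--
--     def levo(self):
--         self.smer = (self.smer - 1) % 4
--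
--     def naprej(self, d):
--         if self.smer == 0:
--             self.y += d
--         elif self.smer == 1:
--             self.x += d
--         elif self.smer == 2:
--             self.y -= d
--         else:
--             self.x -= d
--
--     def koordinate(self):
--         return self.x, self.y
--
--     def razdalja(self):
--         return abs(self.x) + abs(self.y)
-- ===== SOURCE B (Python) =====
-- def roboti(navodila, n):
--     # Count-and-formula computation: each command character starts from smer == 1
--     # (A resets it after every step), so S/J/Z move north/south/west and every
--     # other character (including V) moves east; no simulation needed.
--     rez = []
--     for i in range(n):
--         s = list(navodila[i::n])
--         S = s.count("S")
--         J = s.count("J")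
--         Z = s.count("Z")
--         rez.append((len(s) - S - J - 2 * Z, S - J))
--     return rez
-- ===== Notes on version B (the rewrite author's own statement) =====
-- stated objective: simpler
-- what changed: Replaces the Robot class and the per-character direction-state simulation by counting S/J/Z in each robot's strided command slice and computing the coordinates with a closed arithmetic formula.
import Mathlib
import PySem

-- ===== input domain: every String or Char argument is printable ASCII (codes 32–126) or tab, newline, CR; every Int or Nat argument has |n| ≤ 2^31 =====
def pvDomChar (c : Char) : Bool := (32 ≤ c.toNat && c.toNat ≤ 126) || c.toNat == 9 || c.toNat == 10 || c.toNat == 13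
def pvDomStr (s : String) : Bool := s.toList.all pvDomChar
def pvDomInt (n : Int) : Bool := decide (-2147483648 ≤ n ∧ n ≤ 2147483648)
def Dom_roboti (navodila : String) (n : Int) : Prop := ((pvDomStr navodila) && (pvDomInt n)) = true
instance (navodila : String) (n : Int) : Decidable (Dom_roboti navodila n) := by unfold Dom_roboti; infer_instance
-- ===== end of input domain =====

-- B drops the Robot class: it counts S/J/Z per strided slice and uses a closed coordinate formula (simpler; same cost).

-- ===== PORT A =====
-- A robot is its mutable state (x, y, smer); the class methods become functions on that triple.
def pvLevo (r : Int × Int × Int) : Int × Int × Int := (r.1, r.2.1, PySem.Int.mod (r.2.2 - 1) 4)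

def pvDesno (r : Int × Int × Int) : Int × Int × Int := (r.1, r.2.1, PySem.Int.mod (r.2.2 + 1) 4)

def pvNaprej (r : Int × Int × Int) (d : Int) : Int × Int × Int :=
  if r.2.2 = 0 then (r.1, r.2.1 + d, r.2.2)
  else if r.2.2 = 1 then (r.1 + d, r.2.1, r.2.2)
  else if r.2.2 = 2 then (r.1, r.2.1 - d, r.2.2)
  else (r.1 - d, r.2.1, r.2.2)

-- the body of A's inner loop for one character c (sequential reads/writes of roboti[robo_nr] become lets)
def pvCharStep (r : Int × Int × Int) (c : Char) : Int × Int × Int :=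
  let r1 :=
    if c = 'S' then
      let a := if r.2.2 = 1 then pvLevo r else r
      let b := if a.2.2 = 2 then pvDesno (pvDesno a) else a
      if b.2.2 = 3 then pvDesno b else b
    else if c = 'J' then
      let a := if r.2.2 = 1 then pvDesno r else r
      let b := if a.2.2 = 4 then pvDesno (pvDesno a) else a
      if b.2.2 = 3 then pvLevo b else b
    else if c = 'V' then
      let a := if r.2.2 = 4 then pvDesno r else r
      let b := if a.2.2 = 2 then pvLevo a else a
      if b.2.2 = 3 then pvLevo (pvLevo b) else b
    else if c = 'Z' then
      let a := if r.2.2 = 2 then pvDesno r else r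
      let b := if a.2.2 = 1 then pvLevo (pvLevo a) else a
      if b.2.2 = 4 then pvLevo b else b
    else r
  let r2 := pvNaprej r1 1
  (r2.1, r2.2.1, 1)

def roboti (navodila : String) (n : Int) : List (Int × Int) :=
  let robots0 : List (Int × Int × Int) :=
    (PySem.List.pyRange 0 n 1).foldl (fun acc _ => acc ++ [((0 : Int), (0 : Int), (1 : Int))]) []
  let robots :=
    (PySem.List.pyRange 0 n 1).foldl (fun robots robo_nr =>
      -- navodila[robo_nr::n]; inside the loop n ≥ 1 so the step is never 0 and slice? is `some`
      ((PySem.List.slice? navodila.toList (some robo_nr) none n).getD []).foldl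
        (fun robots c =>
          PySem.List.pySetD robots robo_nr
            (pvCharStep (PySem.List.pyGetD robots robo_nr ((0 : Int), (0 : Int), (1 : Int))) c))
        robots) robots0
  robots.map (fun r => (r.1, r.2.1))

-- ===== PORT B =====
def roboti_alt (navodila : String) (n : Int) : List (Int × Int) :=
  (PySem.List.pyRange 0 n 1).foldl (fun rez i =>
    let s := (PySem.List.slice? navodila.toList (some i) none n).getD []
    let S : Int := (PySem.List.count s 'S' : Int)
    let J : Int := (PySem.List.count s 'J' : Int)
    let Z : Int := (PySem.List.count s 'Z' : Int)
    rez ++ [((s.length : Int) - S - J - 2 * Z, S - J)]) []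

-- ===== PRECONDITION & SPEC =====
def Spec_roboti (navodila : String) (n : Int) (out : List (Int × Int)) : Prop := out = roboti_alt navodila n
instance (navodila : String) (n : Int) (out : List (Int × Int)) : Decidable (Spec_roboti navodila n out) := by unfold Spec_roboti; infer_instance

-- ===== CLAIM (what is proved, stated in full; the proofs are below) =====
def Claim_equal_roboti : Prop := ∀ (navodila : String) (n : Int), Dom_roboti navodila n → Spec_roboti navodila n (roboti navodila n)

-- ===== LEMMAS AND PROOFS =====

-- the x- and y-displacement one command character causes (smer is 1 on entry to every character)
def pvDX (c : Char) : Int := if c = 'S' ∨ c = 'J' then 0 else if c = 'Z' then -1 else 1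

def pvDY (c : Char) : Int := if c = 'S' then 1 else if c = 'J' then -1 else 0

lemma pvCharStep_one (c : Char) (x y : Int) :
    pvCharStep (x, y, 1) c = (x + pvDX c, y + pvDY c, 1) := by
  by_cases hS : c = 'S' <;> by_cases hJ : c = 'J' <;> by_cases hV : c = 'V' <;>
    by_cases hZ : c = 'Z' <;>
    simp_all [pvCharStep, pvLevo, pvDesno, pvNaprej, pvDX, pvDY, PySem.Int.mod] <;> omega

lemma pvFold (cs : List Char) : ∀ (x y : Int),
    cs.foldl pvCharStep (x, y, 1) = (x + (cs.map pvDX).sum, y + (cs.map pvDY).sum, 1) := by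
  induction cs with
  | nil => intro x y; simp
  | cons c cs ih =>
    intro x y
    simp only [List.foldl_cons, List.map_cons, List.sum_cons, pvCharStep_one, ih,
      Prod.mk.injEq]
    refine ⟨by ring, by ring, trivial⟩

lemma pvDXsum (cs : List Char) :
    (cs.map pvDX).sum =
      (cs.length : Int) - cs.count 'S' - cs.count 'J' - 2 * cs.count 'Z' := by
  induction cs with
  | nil => simp
  | cons c cs ih =>
    simp only [List.map_cons, List.sum_cons, List.count_cons, List.length_cons, ih]
    by_cases hS : c = 'S' <;> by_cases hJ : c = 'J' <;> by_cases hZ : c = 'Z' <;>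
      simp_all [pvDX] <;> omega

lemma pvDYsum (cs : List Char) :
    (cs.map pvDY).sum = (cs.count 'S' : Int) - cs.count 'J' := by
  induction cs with
  | nil => simp
  | cons c cs ih =>
    simp only [List.map_cons, List.sum_cons, List.count_cons, ih]
    by_cases hS : c = 'S' <;> by_cases hJ : c = 'J' <;>
      simp_all [pvDY] <;> omega

-- the inner character loop only touches index i: it is one set of the fold over that entry
lemma pvInner (cs : List Char) : ∀ (robots : List (Int × Int × Int)) (i : Nat),
    i < robots.length →
    cs.foldl (fun robots c =>
        PySem.List.pySetD robots (i : Int)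
          (pvCharStep (PySem.List.pyGetD robots (i : Int) ((0:Int), (0:Int), (1:Int))) c)) robots
      = robots.set i (cs.foldl pvCharStep (robots.getD i ((0:Int), (0:Int), (1:Int)))) := by
  induction cs with
  | nil =>
    intro robots i hi
    rw [List.foldl_nil, List.foldl_nil, List.getD_eq_getElem _ _ hi, List.set_getElem_self]
  | cons c cs ih =>
    intro robots i hi
    rw [List.foldl_cons, List.foldl_cons,
      ih (PySem.List.pySetD robots (i : Int)
        (pvCharStep (PySem.List.pyGetD robots (i : Int) ((0:Int), (0:Int), (1:Int))) c)) i
        (by simpa [PySem.List.pySetD_natCast] using hi)]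
    simp only [PySem.List.pySetD_natCast, PySem.List.pyGetD_natCast]
    rw [List.getD_eq_getElem _ _ hi]
    have hv : (robots.set i (pvCharStep robots[i] c)).getD i ((0:Int), (0:Int), (1:Int))
        = pvCharStep robots[i] c := by
      rw [List.getD_eq_getElem _ _ (by simpa using hi), List.getElem_set_self]
    rw [hv, List.set_set]

-- one robot's final state, from initial state (0, 0, 1) on its slice of navodila
def pvSim (navodila : String) (n : Int) (i : Int) : Int × Int × Int :=
  ((PySem.List.slice? navodila.toList (some i) none n).getD []).foldl pvCharStep
    ((0:Int), (0:Int), (1:Int))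

-- the outer loop: robots before index a are finished, the rest are still (0, 0, 1)
lemma pvOuter (navodila : String) (n : Int) (k : Nat) :
    ∀ (a : Int) (pre : List (Int × Int × Int)), a = (pre.length : Int) →
    k = (n - a).toNat →
    (PySem.List.pyRange a n 1).foldl (fun robots robo_nr =>
        ((PySem.List.slice? navodila.toList (some robo_nr) none n).getD []).foldl
          (fun robots c =>
            PySem.List.pySetD robots robo_nr
              (pvCharStep (PySem.List.pyGetD robots robo_nr ((0:Int), (0:Int), (1:Int))) c))
          robots)
      (pre ++ List.replicate k ((0:Int), (0:Int), (1:Int)))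
      = pre ++ (PySem.List.pyRange a n 1).map (pvSim navodila n) := by
  induction k with
  | zero =>
    intro a pre hlen hk
    rw [PySem.List.pyRange_one_eq_nil (by omega)]
    simp
  | succ k ih =>
    intro a pre hlen hk
    subst hlen
    have han : (pre.length : Int) < n := by omega
    rw [PySem.List.pyRange_one_cons han, List.foldl_cons, List.map_cons, List.replicate_succ]
    have hi : pre.length <
        (pre ++ ((0:Int), (0:Int), (1:Int)) :: List.replicate k ((0:Int), (0:Int), (1:Int))).length := by
      simp
    rw [pvInner _ _ pre.length hi]
    have hget : (pre ++ ((0:Int), (0:Int), (1:Int)) ::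
        List.replicate k ((0:Int), (0:Int), (1:Int))).getD pre.length ((0:Int), (0:Int), (1:Int))
        = ((0:Int), (0:Int), (1:Int)) := by simp
    rw [hget]
    have hfold : ((PySem.List.slice? navodila.toList (some (pre.length : Int)) none n).getD
        []).foldl pvCharStep ((0:Int), (0:Int), (1:Int)) = pvSim navodila n (pre.length : Int) := rfl
    rw [hfold]
    have hset : (pre ++ ((0:Int), (0:Int), (1:Int)) ::
          List.replicate k ((0:Int), (0:Int), (1:Int))).set pre.length
          (pvSim navodila n (pre.length : Int))
        = (pre ++ [pvSim navodila n (pre.length : Int)]) ++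
          List.replicate k ((0:Int), (0:Int), (1:Int)) := by
      simp
    rw [hset,
      ih ((pre.length : Int) + 1) (pre ++ [pvSim navodila n (pre.length : Int)])
        (by simp) (by omega)]
    simp

-- ===== VERDICT (by name: the statement is the Claim_ definition above) =====
theorem roboti_spec : Claim_equal_roboti := by
  intro navodila n _
  unfold Spec_roboti roboti roboti_alt
  simp only [PySem.List.foldl_append_singleton_eq_map, List.nil_append]
  rw [show ((PySem.List.pyRange 0 n 1).map
        (fun _ => ((0:Int), (0:Int), (1:Int))))
      = List.replicate n.toNat ((0:Int), (0:Int), (1:Int)) by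
    rw [List.map_const', PySem.List.length_pyRange_one]
    congr 1
    omega]
  have houter := pvOuter navodila n n.toNat 0 [] (by simp) (by omega)
  simp only [List.nil_append] at houter
  rw [houter, List.map_map]
  apply List.map_congr_left
  intro i _
  simp only [Function.comp_apply, pvSim, pvFold, pvDXsum, pvDYsum, PySem.List.count_eq]
  simp
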